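-- pv_equiv track=rewrite | github.com/ehdwoKIM/BaekJoon_Algorithm | 백준/Gold/15686. 치킨 배달/치킨 배달.py | calculate_chicken_distance
-- ===== SOURCE A (Python) =====
-- from itertools import combinations
--
-- def calculate_distance(house, chicken):
--     return abs(house[0] - chicken[0]) + abs(house[1] - chicken[1])
--
-- def calculate_chicken_distance(houses, chickens, m):
--     min_distance = float('inf')
--     for comb in combinations(chickens, m):
--         distance = 0
--         for house in houses:
--             distance += min(calculate_distance(house, chicken) for chicken in comb)
--         min_distance = min(min_distance, distance)
--     return min_distance
-- ===== SOURCE B (Python) =====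
-- def calculate_chicken_distance(houses, chickens, m):
--     n = len(chickens)
--     # distance matrix: one row per house, one column per chicken
--     dist = [[abs(hx - cx) + abs(hy - cy) for (cx, cy) in chickens] for (hx, hy) in houses]
--     INF = float('inf')
--     best = INF
--
--     def rec(start, need, mins):
--         # mins[i] = best distance seen so far from house i to a chosen chicken
--         nonlocal best
--         if need == 0:
--             best = min(best, sum(mins))
--             return
--         for j in range(start, n - need + 1):  # leave room for the remaining need-1 picks
--             rec(j + 1, need - 1, [min(a, row[j]) for a, row in zip(mins, dist)])
--
--     rec(0, m, [INF] * len(houses))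
--     return best
-- ===== Notes on version B (the rewrite author's own statement) =====
-- stated objective: alternative
-- what changed: Instead of materialising each chicken combination and rescanning all chicken coordinates per house, B precomputes a house-by-chicken distance matrix once and runs an incremental backtracking search over chicken indices that threads a running per-house minimum vector, summing it at each complete selection.
-- outside the precondition, e.g. on calculate_chicken_distance([(0, 0)], [(1, 1)], 2): A returns inf, B returns inf; on calculate_chicken_distance([(0, 0)], [(1, 1)], 0): A raises ValueError, B returns inf
import Mathlib
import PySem

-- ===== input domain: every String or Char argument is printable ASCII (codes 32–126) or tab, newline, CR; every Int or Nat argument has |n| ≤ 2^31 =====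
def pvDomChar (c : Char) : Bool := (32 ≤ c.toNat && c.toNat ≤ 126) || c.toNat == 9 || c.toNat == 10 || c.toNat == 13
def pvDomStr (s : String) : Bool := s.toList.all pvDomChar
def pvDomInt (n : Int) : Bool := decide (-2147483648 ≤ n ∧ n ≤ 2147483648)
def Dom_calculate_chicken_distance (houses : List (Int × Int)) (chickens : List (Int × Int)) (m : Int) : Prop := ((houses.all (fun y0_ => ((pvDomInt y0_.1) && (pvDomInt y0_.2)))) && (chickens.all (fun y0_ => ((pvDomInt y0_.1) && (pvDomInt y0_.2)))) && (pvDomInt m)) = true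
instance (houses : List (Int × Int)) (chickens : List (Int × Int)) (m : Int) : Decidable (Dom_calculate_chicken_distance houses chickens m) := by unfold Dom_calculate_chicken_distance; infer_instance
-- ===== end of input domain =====

-- B replaces A's per-combination rescan of chicken coordinates by a precomputed distance
-- matrix and an incremental backtracking search carrying a running per-house minimum vector
-- (objective: alternative decomposition, same exact result on Pre_).

-- ===== PORT A =====
def calculate_distance (house : Int × Int) (chicken : Int × Int) : Int :=
  |house.1 - chicken.1| + |house.2 - chicken.2|

-- itertools.combinations(l, r), in Python's (lexicographic-by-index) order
def pvCombos (l : List (Int × Int)) : Nat → List (List (Int × Int))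
  | 0 => [[]]
  | r + 1 =>
    match l with
    | [] => []
    | x :: xs => ((pvCombos xs r).map (x :: ·)) ++ pvCombos xs (r + 1)

-- min(calculate_distance(house, chicken) for chicken in comb), none = generator not started
def pvInnerMin (house : Int × Int) (comb : List (Int × Int)) : Option Int :=
  comb.foldl (fun acc c =>
    match acc with
    | none => some (calculate_distance house c)
    | some a => some (min a (calculate_distance house c))) none

def calculate_chicken_distance (houses : List (Int × Int)) (chickens : List (Int × Int)) (m : Int) : Int :=
  if m < 0 then 0  -- Python: combinations(, r<0) raises ValueError; excluded by Pre_
  else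
    ((pvCombos chickens m.toNat).foldl
      (fun (acc : Option Int) comb =>
        -- .getD 0: Python's min raises on an empty comb (m = 0 with houses ≠ []); excluded by Pre_
        let distance := houses.foldl (fun s house => s + (pvInnerMin house comb).getD 0) 0
        match acc with
        | none => some distance                -- min_distance = inf
        | some a => some (min a distance)) none).getD 0
  -- .getD 0: with no combination Python returns the float inf, not an int; excluded by Pre_

-- ===== PORT B =====
-- min with None playing float('inf')
def pvMinInf (b : Option Int) (d : Option Int) : Option Int :=
  match b, d with
  | none, d => d
  | some b, none => some b
  | some b, some d => some (min b d)

-- sum(mins) where a None entry is float('inf') (an inf summand makes the sum inf)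
def pvSumInf : List (Option Int) → Option Int
  | [] => some 0
  | none :: _ => none
  | some a :: rest => (pvSumInf rest).map (a + ·)

-- [min(a, row[j]) for a, row in zip(mins, dist)]; min(inf, x) = x
def pvUpdMins (dist : List (List Int)) (mins : List (Option Int)) (j : Nat) : List (Option Int) :=
  List.zipWith (fun a row =>
    match a with
    | none => some (row.getD j 0)      -- row[j]; j < row.length on every reachable call
    | some x => some (min x (row.getD j 0))) mins dist

-- rec(start, need, mins), threading `best`; range(start, n - need + 1) ported as a Nat
-- List.range' of length (n + 1 - need.toNat) - start (exact for need ≥ 0; for need < 0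
-- Python's recursion never returns — it overruns the recursion limit — so nothing is ported there)
def pvRecB (dist : List (List Int)) (n : Nat) (start : Nat) (need : Int)
    (mins : List (Option Int)) (best : Option Int) : Option Int :=
  if need = 0 then pvMinInf best (pvSumInf mins)
  else
    (List.range' start ((n + 1 - need.toNat) - start)).attach.foldl
      (fun b j => pvRecB dist n (j.1 + 1) (need - 1) (pvUpdMins dist mins j.1) b) best
termination_by n + 1 - start
decreasing_by
  have h := j.2
  have := List.mem_range'_1.mp h
  omega

def calculate_chicken_distance_alt (houses : List (Int × Int)) (chickens : List (Int × Int)) (m : Int) : Int :=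
  let n := chickens.length
  let dist := houses.map (fun h => chickens.map (fun c => |h.1 - c.1| + |h.2 - c.2|))
  -- .getD 0: best = inf (no complete selection) is the float inf, not an int; excluded by Pre_
  (pvRecB dist n 0 m (List.replicate houses.length none) none).getD 0

-- ===== PRECONDITION & SPEC =====
-- Pre_ excludes exactly the inputs where Python A does not return an int: m < 0 and
-- (m = 0, houses ≠ []) raise ValueError, and m > len(chickens) returns the float inf.
def Pre_calculate_chicken_distance (houses : List (Int × Int)) (chickens : List (Int × Int)) (m : Int) : Prop :=
  (1 ≤ m ∧ m ≤ (chickens.length : Int)) ∨ (m = 0 ∧ houses = [])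
instance (houses : List (Int × Int)) (chickens : List (Int × Int)) (m : Int) : Decidable (Pre_calculate_chicken_distance houses chickens m) := by unfold Pre_calculate_chicken_distance; infer_instance

def pvWitness_calculate_chicken_distance : (List (Int × Int)) × (List (Int × Int)) × Int :=
  ([(0, 0), (2, 3)], ([(1, 1), (4, 4), (0, 2)], 2))

def Spec_calculate_chicken_distance (houses : List (Int × Int)) (chickens : List (Int × Int)) (m : Int) (out : Int) : Prop := out = calculate_chicken_distance_alt houses chickens m
instance (houses : List (Int × Int)) (chickens : List (Int × Int)) (m : Int) (out : Int) : Decidable (Spec_calculate_chicken_distance houses chickens m out) := by unfold Spec_calculate_chicken_distance; infer_instance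

-- ===== CLAIM (what is proved, stated in full; the proofs are below) =====
def Claim_equal_calculate_chicken_distance : Prop := ∀ (houses : List (Int × Int)) (chickens : List (Int × Int)) (m : Int), Dom_calculate_chicken_distance houses chickens m → Pre_calculate_chicken_distance houses chickens m → Spec_calculate_chicken_distance houses chickens m (calculate_chicken_distance houses chickens m)

-- ===== LEMMAS AND PROOFS =====

def combosIdx (n : Nat) : Nat → Nat → List (List Nat)
  | 0, _ => [[]]
  | r + 1, start =>
    (List.range' start ((n - r) - start)).flatMap (fun j => (combosIdx n r (j + 1)).map (j :: ·))

theorem foldl_flatMap' {α β γ : Type} (l : List α) (f : α → List β) (g : γ → β → γ) (init : γ) :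
    (l.flatMap f).foldl g init = l.foldl (fun acc a => (f a).foldl g acc) init := by
  induction l generalizing init with
  | nil => rfl
  | cons x xs ih => simp [List.flatMap_cons, List.foldl_append, ih]

theorem pvRecB_eq (dist : List (List Int)) (n : Nat) :
    ∀ (r start : Nat) (mins : List (Option Int)) (best : Option Int),
      pvRecB dist n start (r : Int) mins best =
        (combosIdx n r start).foldl
          (fun b js => pvMinInf b (pvSumInf (js.foldl (pvUpdMins dist) mins))) best := by
  intro r
  induction r with
  | zero =>
    intro start mins best
    rw [pvRecB]
    simp [combosIdx]
  | succ r ih =>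
    intro start mins best
    rw [pvRecB]
    have hne : ¬ ((r + 1 : Nat) : Int) = 0 := by
      push_cast; omega
    rw [if_neg hne]
    have hcast : ((r + 1 : Nat) : Int) - 1 = (r : Int) := by push_cast; omega
    have hlen : (n + 1 - ((r + 1 : Nat) : Int).toNat) - start = (n - r) - start := by
      simp
    rw [hlen, combosIdx, foldl_flatMap']
    rw [List.foldl_attach (f := fun b x => pvRecB dist n (x + 1) (((r + 1 : Nat) : Int) - 1) (pvUpdMins dist mins x) b)]
    apply PySem.List.foldl_congr_mem
    intro b j hj
    rw [hcast, ih, List.foldl_map]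
    rfl
-- every index list produced by combosIdx has length r and entries in [start, n)
theorem combosIdx_mem (n : Nat) :
    ∀ (r start : Nat) (js : List Nat), js ∈ combosIdx n r start →
      js.length = r ∧ ∀ j ∈ js, start ≤ j ∧ j < n := by
  intro r
  induction r with
  | zero =>
    intro start js hjs
    simp [combosIdx] at hjs
    subst hjs
    simp
  | succ r ih =>
    intro start js hjs
    simp only [combosIdx, List.mem_flatMap, List.mem_map] at hjs
    obtain ⟨j, hjmem, tl, htl, rfl⟩ := hjs
    have hj := List.mem_range'_1.mp hjmem
    obtain ⟨hlen, hall⟩ := ih (j + 1) tl htl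
    refine ⟨by simp [hlen], ?_⟩
    intro k hk
    rcases List.mem_cons.mp hk with rfl | hk
    · omega
    · have := hall k hk
      omega

-- pvCombos is empty when the pool is too small
theorem pvCombos_short : ∀ (l : List (Int × Int)) (r : Nat), l.length < r → pvCombos l r = [] := by
  intro l
  induction l with
  | nil => intro r hr; cases r with
    | zero => omega
    | succ r => rfl
  | cons x xs ih =>
    intro r hr
    cases r with
    | zero => omega
    | succ r =>
      rw [pvCombos, ih r (by simp at hr; omega), ih (r + 1) (by simp at hr; omega)]
      simp

-- pvCombos on a suffix of chickens = combosIdx mapped through indexing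
theorem pvCombos_eq_combosIdx (chickens : List (Int × Int)) :
    ∀ (l : List (Int × Int)) (r s : Nat), chickens.drop s = l →
      pvCombos l r =
        (combosIdx chickens.length r s).map (List.map (fun j => chickens.getD j (0, 0))) := by
  intro l
  induction l with
  | nil =>
    intro r s hdrop
    have hs : chickens.length ≤ s := List.drop_eq_nil_iff.mp hdrop
    cases r with
    | zero => simp [pvCombos, combosIdx]
    | succ r =>
      have h0 : chickens.length - r - s = 0 := by omega
      rw [combosIdx, h0]
      simp [pvCombos]
  | cons x xs ih =>
    intro r s hdrop
    cases r with
    | zero => simp [pvCombos, combosIdx]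
    | succ r =>
      by_cases hroom : s + r < chickens.length
      case neg =>
        have hdl : (x :: xs).length = chickens.length - s := by
          rw [← hdrop, List.length_drop]
        have hs : s < chickens.length := by
          by_contra h
          rw [List.drop_eq_nil_iff.mpr (by omega)] at hdrop
          exact List.cons_ne_nil x xs hdrop.symm
        have hlen0 : chickens.length - r - s = 0 := by omega
        rw [pvCombos_short _ _ (by omega), combosIdx, hlen0]
        simp
      have hs : s < chickens.length := by omega
      have hx : chickens[s]?.getD (0, 0) = x := by
        have h0 : (chickens.drop s)[0]? = some x := by rw [hdrop]; rfl
        rw [List.getElem?_drop] at h0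
        simp at h0
        simp [h0]
      have hxs : chickens.drop (s + 1) = xs := by
        have := congrArg (List.drop 1) hdrop
        simpa [List.drop_drop, Nat.add_comm] using this
      have hrange : List.range' s (chickens.length - r - s) =
          s :: List.range' (s + 1) (chickens.length - r - (s + 1)) := by
        have h1 : chickens.length - r - s = (chickens.length - r - (s + 1)) + 1 := by omega
        rw [h1, List.range'_succ]
      have hstep : combosIdx chickens.length (r + 1) s =
          ((combosIdx chickens.length r (s + 1)).map (s :: ·)) ++
            combosIdx chickens.length (r + 1) (s + 1) := by
        rw [combosIdx, hrange, List.flatMap_cons]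
        rfl
      rw [pvCombos, hstep, List.map_append, ih r (s + 1) hxs, ih (r + 1) (s + 1) hxs,
        List.map_map, List.map_map]
      congr 1
      apply List.map_congr_left
      intro js _
      simp [Function.comp, List.getD, hx]
-- one min-update step on an optional running minimum (none = inf)
def upd1 (a : Option Int) (d : Int) : Option Int :=
  match a with
  | none => some d
  | some x => some (min x d)

theorem updMins_map (rowf : (Int × Int) → List Int) (g : (Int × Int) → Option Int) (j : Nat) :
    ∀ (houses : List (Int × Int)),
      pvUpdMins (houses.map rowf) (houses.map g) j =
        houses.map (fun h => upd1 (g h) ((rowf h).getD j 0)) := by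
  intro houses
  induction houses with
  | nil => rfl
  | cons h hs ih => simp only [List.map_cons, pvUpdMins, List.zipWith_cons_cons] at ih ⊢; rw [← ih]; rfl

theorem foldl_updMins_map (rowf : (Int × Int) → List Int) (houses : List (Int × Int)) :
    ∀ (js : List Nat) (g : (Int × Int) → Option Int),
      js.foldl (pvUpdMins (houses.map rowf)) (houses.map g) =
        houses.map (fun h => js.foldl (fun a j => upd1 a ((rowf h).getD j 0)) (g h)) := by
  intro js
  induction js with
  | nil => intro g; rfl
  | cons j js ih =>
    intro g
    rw [List.foldl_cons, updMins_map rowf g j, ih]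
    rfl

theorem getD_map_lt (chickens : List (Int × Int)) (f : (Int × Int) → Int) (j : Nat)
    (hj : j < chickens.length) :
    (chickens.map f).getD j 0 = f (chickens.getD j (0, 0)) := by
  simp [List.getD, hj]

theorem foldl_upd1_some (f : Nat → Int) :
    ∀ (js : List Nat) (x : Int), js.foldl (fun a j => upd1 a (f j)) (some x) =
      some ((js.foldl (fun a j => upd1 a (f j)) (some x)).getD 0) := by
  intro js
  induction js with
  | nil => intro x; rfl
  | cons j js ih => intro x; rw [List.foldl_cons]; exact ih _
theorem pvInnerMin_eq_foldl (h : Int × Int) (chickens : List (Int × Int)) (js : List Nat) :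
    pvInnerMin h (js.map (fun j => chickens.getD j (0, 0))) =
      js.foldl (fun a j => upd1 a (calculate_distance h (chickens.getD j (0, 0)))) none := by
  rw [pvInnerMin, List.foldl_map]
  apply PySem.List.foldl_congr_mem
  intro acc j _
  cases acc <;> rfl

theorem foldl_upd1_ne_none (f : Nat → Int) (js : List Nat) (hjs : js ≠ []) :
    js.foldl (fun a j => upd1 a (f j)) none =
      some ((js.foldl (fun a j => upd1 a (f j)) none).getD 0) := by
  cases js with
  | nil => exact absurd rfl hjs
  | cons j js => rw [List.foldl_cons]; exact foldl_upd1_some f js _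

theorem pvSumInf_map_some (f : (Int × Int) → Int) :
    ∀ (houses : List (Int × Int)),
      pvSumInf (houses.map (fun h => some (f h))) =
        some (houses.foldl (fun s h => s + f h) 0) := by
  intro houses
  induction houses with
  | nil => rfl
  | cons h hs ih =>
    rw [List.map_cons, pvSumInf, ih, Option.map_some]
    rw [PySem.List.foldl_add (g := f), PySem.List.foldl_add (g := f)]
    simp

-- key per-combination lemma: B's running-minimum vector summed = A's per-comb distance
theorem per_comb (houses chickens : List (Int × Int)) (js : List Nat)
    (hlt : ∀ j ∈ js, j < chickens.length) (hne : js ≠ []) :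
    pvSumInf (js.foldl (pvUpdMins (houses.map (fun h => chickens.map (fun c => |h.1 - c.1| + |h.2 - c.2|))))
        (List.replicate houses.length none)) =
      some (houses.foldl
        (fun s house => s + (pvInnerMin house (js.map (fun j => chickens.getD j (0, 0)))).getD 0) 0) := by
  have hrep : (List.replicate houses.length (none : Option Int)) =
      houses.map (fun _ => none) := by simp
  rw [hrep, foldl_updMins_map]
  have hentry : ∀ h : Int × Int,
      js.foldl (fun a j => upd1 a ((chickens.map (fun c => |h.1 - c.1| + |h.2 - c.2|)).getD j 0)) none =
        some ((pvInnerMin h (js.map (fun j => chickens.getD j (0, 0)))).getD 0) := by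
    intro h
    have hcongr : js.foldl (fun a j => upd1 a ((chickens.map (fun c => |h.1 - c.1| + |h.2 - c.2|)).getD j 0)) none =
        js.foldl (fun a j => upd1 a (calculate_distance h (chickens.getD j (0, 0)))) none := by
      apply PySem.List.foldl_congr_mem
      intro acc j hj
      rw [getD_map_lt chickens _ j (hlt j hj)]
      rfl
    rw [hcongr, pvInnerMin_eq_foldl, foldl_upd1_ne_none _ js hne]
    rfl
  calc pvSumInf (houses.map fun h =>
          js.foldl (fun a j => upd1 a ((chickens.map (fun c => |h.1 - c.1| + |h.2 - c.2|)).getD j 0)) none)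
      = pvSumInf (houses.map fun h =>
          some ((pvInnerMin h (js.map (fun j => chickens.getD j (0, 0)))).getD 0)) := by
        congr 1; exact List.map_congr_left (fun h _ => hentry h)
    _ = _ := pvSumInf_map_some _ houses
theorem main_spec : ∀ (houses : List (Int × Int)) (chickens : List (Int × Int)) (m : Int),
    Pre_calculate_chicken_distance houses chickens m →
    calculate_chicken_distance houses chickens m = calculate_chicken_distance_alt houses chickens m := by
  intro houses chickens m hpre
  rcases hpre with ⟨hm1, hm2⟩ | ⟨hm0, hhouses⟩
  · -- 1 ≤ m ≤ len(chickens)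
    have hmnn : ¬ m < 0 := by omega
    set r := m.toNat with hr
    have hmr : (r : Int) = m := Int.toNat_of_nonneg (by omega)
    have hr1 : 1 ≤ r := by omega
    rw [calculate_chicken_distance, if_neg hmnn, calculate_chicken_distance_alt]
    rw [← hmr, pvRecB_eq]
    simp only [Int.toNat_natCast]
    rw [pvCombos_eq_combosIdx chickens chickens r 0 List.drop_zero, List.foldl_map]
    congr 1
    apply PySem.List.foldl_congr_mem
    intro acc js hjs
    obtain ⟨hlen, hbnd⟩ := combosIdx_mem chickens.length r 0 js hjs
    have hne : js ≠ [] := by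
      intro h; rw [h] at hlen; simp at hlen; omega
    rw [per_comb houses chickens js (fun j hj => (hbnd j hj).2) hne]
    cases acc <;> rfl
  · -- m = 0 and houses = []
    subst hm0 hhouses
    rw [calculate_chicken_distance, if_neg (by omega), calculate_chicken_distance_alt]
    rw [pvRecB]
    simp [pvCombos, pvSumInf, pvMinInf]

-- ===== VERDICT (by name: the statement is the Claim_ definition above) =====
theorem calculate_chicken_distance_spec : Claim_equal_calculate_chicken_distance := by
  intro houses chickens m _ hpre
  unfold Spec_calculate_chicken_distance
  exact main_spec houses chickens m hpre
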